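-- pv_equiv track=rewrite | github.com/mongodb/mongo | src/third_party/wiredtiger/tools/wt-mcp/server.py | _parse_config_field
-- ===== SOURCE A (Python) =====
-- from typing import Dict, List, Optional
--
-- def _parse_config_field(config_str: str, key: str) -> Optional[str]:
--     """
--     Extract a top-level configuration field from a WiredTiger config string.
--
--     Handles nested parentheses correctly --only splits on commas that are not
--     inside parenthesised groups.  Returns None if the key is not found.
--     """
--     depth = 0
--     start = 0
--     parts: list[str] = []
--
--     for i, ch in enumerate(config_str):
--         if ch == '(':
--             depth += 1
--         elif ch == ')':
--             depth -= 1
--         elif ch == ',' and depth == 0: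
--             parts.append(config_str[start:i])
--             start = i + 1
--     parts.append(config_str[start:])
--
--     for part in parts:
--         if "=" in part:
--             k, v = part.split("=", 1)
--             if k.strip() == key:
--                 return v.strip()
--     return None
-- ===== SOURCE B (Python) =====
-- from typing import Optional
--
--
-- def _check_field(part: str, key: str) -> Optional[str]:
--     if "=" in part:
--         k, v = part.split("=", 1)
--         if k.strip() == key:
--             return v.strip()
--     return None
--
--
-- def _parse_config_field(config_str: str, key: str) -> Optional[str]:
--     """Single pass: accumulate the current top-level field and test it as soon
--     as it is complete (at each depth-0 comma and once at the end)."""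
--     depth = 0
--     cur: list[str] = []
--     for ch in config_str:
--         if ch == '(':
--             depth += 1
--             cur.append(ch)
--         elif ch == ')':
--             depth -= 1
--             cur.append(ch)
--         elif ch == ',' and depth == 0:
--             r = _check_field(''.join(cur), key)
--             if r is not None:
--                 return r
--             cur = []
--         else:
--             cur.append(ch)
--     return _check_field(''.join(cur), key)
-- ===== Notes on version B (the rewrite author's own statement) =====
-- stated objective: alternative
-- what changed: B fuses A's two passes (split into a parts list, then scan the list) into one early-returning pass that accumulates only the current top-level field and tests it at each depth-0 comma and once at the end, eliminating the intermediate parts list.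
import Mathlib
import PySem

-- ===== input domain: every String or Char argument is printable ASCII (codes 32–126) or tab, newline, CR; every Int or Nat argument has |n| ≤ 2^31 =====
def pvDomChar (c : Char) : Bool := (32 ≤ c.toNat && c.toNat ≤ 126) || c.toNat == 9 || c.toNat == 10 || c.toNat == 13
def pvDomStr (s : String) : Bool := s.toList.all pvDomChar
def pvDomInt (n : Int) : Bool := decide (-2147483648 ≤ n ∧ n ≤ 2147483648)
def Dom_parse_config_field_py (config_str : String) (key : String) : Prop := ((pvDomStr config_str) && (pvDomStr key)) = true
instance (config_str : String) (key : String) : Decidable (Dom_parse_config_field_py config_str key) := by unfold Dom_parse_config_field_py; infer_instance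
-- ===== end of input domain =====

-- B fuses A's split-then-scan into one early-returning pass over the characters; alternative decomposition, same O(n) cost.

-- ===== PORT A =====
-- one step of A's first loop (depth/start/parts over enumerate(config_str))
def aStep (cs : List Char) (st : Int × Int × List (List Char)) (ic : Int × Char) :
    Int × Int × List (List Char) :=
  if ic.2 = '(' then (st.1 + 1, st.2.1, st.2.2)
  else if ic.2 = ')' then (st.1 - 1, st.2.1, st.2.2)
  else if ic.2 = ',' ∧ st.1 = 0 then
    (st.1, ic.1 + 1, st.2.2 ++ [PySem.List.slice cs (some st.2.1) (some ic.1)])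
  else st

-- A's second loop: first part containing '=' whose stripped key matches wins
def aFind (parts : List (List Char)) (key : List Char) : Option (List Char) :=
  match parts with
  | [] => none
  | part :: rest =>
    if PySem.Chars.isIn ['='] part then
      match PySem.Chars.splitOnMax part ['='] 1 with
      | [k, v] => if PySem.Chars.strip k = key then some (PySem.Chars.strip v) else aFind rest key
      | _ => aFind rest key   -- unreachable: split(sep, 1) with sep present yields exactly 2 pieces
    else aFind rest key

def parse_config_field_py (config_str : String) (key : String) : Option String :=
  let cs := config_str.toList
  let st := (PySem.List.enumerate cs 0).foldl (aStep cs) (0, 0, [])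
  let parts := st.2.2 ++ [PySem.List.slice cs (some st.2.1) none]
  (aFind parts key.toList).map String.ofList

-- ===== PORT B =====
def bCheck (part : List Char) (key : List Char) : Option (List Char) :=
  if PySem.Chars.isIn ['='] part then
    match PySem.Chars.splitOnMax part ['='] 1 with
    | [k, v] => if PySem.Chars.strip k = key then some (PySem.Chars.strip v) else none
    | _ => none   -- unreachable: split(sep, 1) with sep present yields exactly 2 pieces
  else none

def bLoop (key : List Char) : List Char → Int → List Char → Option (List Char)
  | [], _, cur => bCheck cur key
  | ch :: rest, depth, cur =>
    if ch = '(' then bLoop key rest (depth + 1) (cur ++ [ch])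
    else if ch = ')' then bLoop key rest (depth - 1) (cur ++ [ch])
    else if ch = ',' ∧ depth = 0 then
      match bCheck cur key with
      | some v => some v
      | none => bLoop key rest depth []
    else bLoop key rest depth (cur ++ [ch])

def parse_config_field_py_alt (config_str : String) (key : String) : Option String :=
  (bLoop key.toList config_str.toList 0 []).map String.ofList

-- ===== PRECONDITION & SPEC =====
def Spec_parse_config_field_py (config_str : String) (key : String) (out : Option String) : Prop := out = parse_config_field_py_alt config_str key
instance (config_str : String) (key : String) (out : Option String) : Decidable (Spec_parse_config_field_py config_str key out) := by unfold Spec_parse_config_field_py; infer_instance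

-- ===== CLAIM (what is proved, stated in full; the proofs are below) =====
def Claim_equal_parse_config_field_py : Prop := ∀ (config_str : String) (key : String), Dom_parse_config_field_py config_str key → Spec_parse_config_field_py config_str key (parse_config_field_py config_str key)

-- ===== LEMMAS AND PROOFS =====

-- proof-side: the segments A's first loop produces, computed by B's traversal
def segs : List Char → Int → List Char → List (List Char)
  | [], _, cur => [cur]
  | ch :: rest, depth, cur =>
    if ch = '(' then segs rest (depth + 1) (cur ++ [ch])
    else if ch = ')' then segs rest (depth - 1) (cur ++ [ch])
    else if ch = ',' ∧ depth = 0 then cur :: segs rest depth []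
    else segs rest depth (cur ++ [ch])

-- proof-side: A's parts list from the final fold state
def afterParts (cs : List Char) (st : Int × Int × List (List Char)) : List (List Char) :=
  st.2.2 ++ [PySem.List.slice cs (some st.2.1) none]

theorem aFind_cons (p : List Char) (rest : List (List Char)) (key : List Char) :
    aFind (p :: rest) key =
      match bCheck p key with
      | some v => some v
      | none => aFind rest key := by
  simp only [aFind, bCheck]
  by_cases h : PySem.Chars.isIn ['='] p
  · simp only [h, if_true]
    rcases hs : PySem.Chars.splitOnMax p ['='] 1 with _ | ⟨k, _ | ⟨v, _ | _⟩⟩ <;> simp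
    split <;> simp
  · simp [h]

theorem bLoop_eq_aFind (key : List Char) (cs : List Char) :
    ∀ (depth : Int) (cur : List Char),
    bLoop key cs depth cur = aFind (segs cs depth cur) key := by
  induction cs with
  | nil =>
    intro depth cur
    simp only [bLoop, segs, aFind_cons, aFind]
    cases bCheck cur key <;> rfl
  | cons ch rest ih =>
    intro depth cur
    simp only [bLoop, segs]
    by_cases h1 : ch = '('
    · simp [h1, ih]
    · by_cases h2 : ch = ')'
      · simp [h2, ih]
      · by_cases h3 : ch = ',' ∧ depth = 0
        · simp [h3.1, h3.2, ih, aFind_cons]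
        · simp [h1, h2, h3, ih]

-- drop/take bookkeeping: extending the current segment by one character
theorem take_drop_succ (cs : List Char) (start n : Nat) (ch : Char) (rest : List Char)
    (hsn : start ≤ n) (hdrop : cs.drop n = ch :: rest) :
    (cs.drop start).take (n + 1 - start) = (cs.drop start).take (n - start) ++ [ch] := by
  have hget : (cs.drop start)[n - start]? = some ch := by
    have h0 : (cs.drop n)[0]? = some ch := by rw [hdrop]; rfl
    rw [List.getElem?_drop] at h0
    rw [List.getElem?_drop, show start + (n - start) = n by omega]
    simpa using h0
  rw [show n + 1 - start = (n - start) + 1 by omega, List.take_add_one, hget]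
  rfl

theorem aLoop_inv (cs : List Char) :
    ∀ (rest : List Char) (n : Nat) (depth : Int) (start : Nat) (parts : List (List Char)),
    cs.drop n = rest → start ≤ n → n ≤ cs.length →
    afterParts cs ((PySem.List.enumerate rest (n : Int)).foldl (aStep cs) (depth, (start : Int), parts))
    = parts ++ segs rest depth ((cs.drop start).take (n - start)) := by
  intro rest
  induction rest with
  | nil =>
    intro n depth start parts hdrop hsn hnl
    have hn : n = cs.length := by
      have := List.drop_eq_nil_iff.mp hdrop
      omega
    simp only [PySem.List.enumerate_nil, List.foldl_nil, segs, afterParts]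
    rw [PySem.List.slice_from_natCast]
    have : (cs.drop start).take (n - start) = cs.drop start := by
      apply List.take_of_length_le
      simp [hn]
    rw [this]
  | cons ch rest ih =>
    intro n depth start parts hdrop hsn hnl
    have hlen : n < cs.length := by
      by_contra h
      simp [List.drop_eq_nil_of_le (Nat.le_of_not_lt h)] at hdrop
    have hdrop' : cs.drop (n + 1) = rest := by
      calc cs.drop (n + 1) = (cs.drop n).drop 1 := by rw [← List.drop_drop]
        _ = rest := by rw [hdrop]; rfl
    have hext : ∀ s : Nat, s ≤ n →
        (cs.drop s).take (n + 1 - s) = (cs.drop s).take (n - s) ++ [ch] :=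
      fun s hs => take_drop_succ cs s n ch rest hs hdrop
    simp only [PySem.List.enumerate_cons, List.foldl_cons]
    rw [show ((n : Int) + 1) = ((n + 1 : Nat) : Int) by push_cast; ring]
    by_cases h1 : ch = '('
    · rw [show aStep cs (depth, (start : Int), parts) ((n : Int), ch)
            = (depth + 1, (start : Int), parts) from by simp [aStep, h1]]
      rw [ih (n + 1) (depth + 1) start parts hdrop' (by omega) (by omega), hext start hsn]
      simp only [segs]
      rw [if_pos h1]
    · by_cases h2 : ch = ')'
      · rw [show aStep cs (depth, (start : Int), parts) ((n : Int), ch)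
              = (depth - 1, (start : Int), parts) from by simp [aStep, h2]]
        rw [ih (n + 1) (depth - 1) start parts hdrop' (by omega) (by omega), hext start hsn]
        simp only [segs]
        rw [if_neg h1, if_pos h2]
      · by_cases h3 : ch = ',' ∧ depth = 0
        · rw [show aStep cs (depth, (start : Int), parts) ((n : Int), ch)
                = (depth, (n : Int) + 1, parts ++ [PySem.List.slice cs (some (start : Int)) (some (n : Int))]) from by
              simp [aStep, h3.1, h3.2]]
          rw [show ((n : Int) + 1) = ((n + 1 : Nat) : Int) by push_cast; ring]
          rw [PySem.List.slice_natCast]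
          rw [ih (n + 1) depth (n + 1) (parts ++ [(cs.drop start).take (n - start)]) hdrop' (by omega) (by omega)]
          simp only [segs]
          rw [if_neg (by simp [h3.1]), if_neg (by simp [h3.1]), if_pos h3]
          simp
        · rw [show aStep cs (depth, (start : Int), parts) ((n : Int), ch)
                = (depth, (start : Int), parts) from by simp [aStep, h1, h2, h3]]
          rw [ih (n + 1) depth start parts hdrop' (by omega) (by omega), hext start hsn]
          simp only [segs]
          rw [if_neg h1, if_neg h2, if_neg h3]

-- ===== VERDICT (by name: the statement is the Claim_ definition above) =====
theorem parse_config_field_py_spec : Claim_equal_parse_config_field_py := by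
  intro config_str key _
  unfold Spec_parse_config_field_py parse_config_field_py parse_config_field_py_alt
  have h := aLoop_inv config_str.toList config_str.toList 0 0 0 [] rfl (le_refl 0) (by omega)
  simp only [afterParts] at h
  rw [show ((0 : Nat) : Int) = (0 : Int) from rfl] at h
  simp only [h]
  rw [bLoop_eq_aFind]
  simp
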